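-- pv_equiv track=rewrite | github.com/chylkov/HSEworkspace | another_list_homework_Serdyuk.py | triangle_4
-- ===== SOURCE A (Python) =====
-- def triangle_4(N):
--     matrix = []
--     for i in range(N):
--         row = []
--         for j in range(N):
--             if (i + j) >= N-1:
--                 row.append(1)
--             else:
--                 row.append(0)
--         matrix.append(row)
--     return matrix
-- ===== SOURCE B (Python) =====
-- def triangle_4(N):
--     return [[0] * (N - 1 - i) + [1] * (i + 1) for i in range(N)]
-- ===== Notes on version B (the rewrite author's own statement) =====
-- stated objective: simpler
-- what changed: Each row is built directly by block concatenation [0]*(N-1-i)+[1]*(i+1), eliminating the inner per-cell comparison loop.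
import Mathlib
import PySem

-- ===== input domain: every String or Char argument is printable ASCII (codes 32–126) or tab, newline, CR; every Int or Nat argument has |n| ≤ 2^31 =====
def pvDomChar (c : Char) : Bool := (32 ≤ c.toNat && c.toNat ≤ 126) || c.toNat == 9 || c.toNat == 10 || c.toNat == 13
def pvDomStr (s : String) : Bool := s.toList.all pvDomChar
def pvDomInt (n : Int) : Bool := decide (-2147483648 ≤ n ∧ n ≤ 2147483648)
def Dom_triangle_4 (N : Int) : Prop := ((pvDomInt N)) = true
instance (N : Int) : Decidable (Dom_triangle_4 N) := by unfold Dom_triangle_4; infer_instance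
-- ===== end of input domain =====

-- B builds each row by block concatenation [0]*(N-1-i)+[1]*(i+1) instead of a per-cell comparison loop (objective: simpler).

-- ===== PORT A =====
def triangle_4 (N : Int) : List (List Int) :=
  (PySem.List.pyRange 0 N 1).foldl (fun matrix i =>
    matrix ++ [(PySem.List.pyRange 0 N 1).foldl (fun row j =>
      row ++ [if N - 1 ≤ i + j then (1 : Int) else 0]) []]) []

-- ===== PORT B =====
def triangle_4_alt (N : Int) : List (List Int) :=
  (PySem.List.pyRange 0 N 1).map (fun i =>
    List.replicate (N - 1 - i).toNat 0 ++ List.replicate (i + 1).toNat 1)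

-- ===== PRECONDITION & SPEC =====
def Spec_triangle_4 (N : Int) (out : List (List Int)) : Prop := out = triangle_4_alt N
instance (N : Int) (out : List (List Int)) : Decidable (Spec_triangle_4 N out) := by unfold Spec_triangle_4; infer_instance

-- ===== CLAIM (what is proved, stated in full; the proofs are below) =====
def Claim_equal_triangle_4 : Prop := ∀ (N : Int), Dom_triangle_4 N → Spec_triangle_4 N (triangle_4 N)

-- ===== LEMMAS AND PROOFS =====

-- append-accumulator fold is a map
theorem pv_foldl_push {α β : Type} (f : α → β) (l : List α) (acc : List β) :
    l.foldl (fun r x => r ++ [f x]) acc = acc ++ l.map f := by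
  induction l generalizing acc with
  | nil => simp
  | cons a l ih => simp [List.foldl_cons, ih]

-- a 0/1 row defined by a threshold test is a pair of blocks
theorem pv_range_map_ite (n t : Nat) (ht : t ≤ n) :
    (List.range n).map (fun k => if t ≤ k then (1 : Int) else 0)
      = List.replicate t 0 ++ List.replicate (n - t) 1 := by
  induction n with
  | zero =>
    have : t = 0 := Nat.le_zero.mp ht
    simp [this]
  | succ n ih =>
    rcases Nat.lt_or_ge t (n + 1) with h | h
    · have ht' : t ≤ n := Nat.lt_succ_iff.mp h
      rw [List.range_succ, List.map_append, ih ht']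
      have : n + 1 - t = (n - t) + 1 := by omega
      simp [this, List.replicate_succ', if_pos ht']
    · have : t = n + 1 := Nat.le_antisymm ht h
      subst this
      simp only [Nat.sub_self, List.replicate_zero, List.append_nil]
      rw [show List.replicate (n + 1) (0 : Int) = List.replicate (List.range (n + 1)).length 0 by simp]
      apply List.map_eq_replicate_iff.mpr
      intro x hx
      have := List.mem_range.mp hx
      simp [Nat.not_le.mpr this]

theorem triangle_4_eq_alt (N : Int) : triangle_4 N = triangle_4_alt N := by
  unfold triangle_4 triangle_4_alt
  rw [pv_foldl_push, List.nil_append]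
  apply List.map_congr_left
  intro i hi
  have hi' := (PySem.List.mem_pyRange_one).mp hi
  rw [pv_foldl_push, List.nil_append]
  rw [PySem.List.pyRange_one 0 N]
  rw [List.map_map]
  have hstep : (fun k : Nat => (if N - 1 ≤ i + (0 + (k : Int)) then (1 : Int) else 0))
      = fun k : Nat => if (N - 1 - i).toNat ≤ k then (1 : Int) else 0 := by
    funext k
    by_cases h : N - 1 ≤ i + (0 + (k : Int))
    · rw [if_pos h, if_pos (by omega)]
    · rw [if_neg h, if_neg (by omega)]
  have hcomp : ((fun j : Int => if N - 1 ≤ i + j then (1 : Int) else 0) ∘ fun k : Nat => 0 + (k : Int))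
      = fun k : Nat => if (N - 1 - i).toNat ≤ k then (1 : Int) else 0 := by
    funext k; exact congrFun hstep k
  rw [hcomp]
  have ht : (N - 1 - i).toNat ≤ (N - 0).toNat := by omega
  rw [pv_range_map_ite _ _ ht]
  have : (N - 0).toNat - (N - 1 - i).toNat = (i + 1).toNat := by omega
  rw [this]

-- ===== VERDICT (by name: the statement is the Claim_ definition above) =====
theorem triangle_4_spec : Claim_equal_triangle_4 := by
  intro N _
  unfold Spec_triangle_4
  exact triangle_4_eq_alt N
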